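-- pv_equiv track=rewrite | github.com/DerekMontesdeoca/push-swap | python/push_swap/push_swap/algo.py | sorted_position
-- ===== SOURCE A (Python) =====
-- def sorted_position(elem: int, circular_list: list[int]) -> int:
--     if len(circular_list) < 2:
--         return 0
--     minimum = 0
--     if circular_list[-1] >= elem >= circular_list[0]:
--         return len(circular_list) - 1
--     for i in range(len(circular_list) - 1):
--         if circular_list[i] < circular_list[minimum]:
--             minimum = i
--         if circular_list[i] >= elem >= circular_list[i + 1]:
--             return i
--     if circular_list[-1] < circular_list[minimum]:
--         minimum = len(circular_list) - 1
--     return minimum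
-- ===== SOURCE B (Python) =====
-- def sorted_position(elem: int, circular_list: list[int]) -> int:
--     n = len(circular_list)
--     if n < 2:
--         return 0
--     # collect every circular index whose adjacent (descending) pair brackets elem
--     hits = [j for j in range(n)
--             if circular_list[j] >= elem >= circular_list[(j + 1) % n]]
--     if hits:
--         # the wraparound pair (index n-1) has priority; otherwise the earliest pair wins
--         return n - 1 if hits[-1] == n - 1 else hits[0]
--     return min(range(n), key=circular_list.__getitem__)
-- ===== Notes on version B (the rewrite author's own statement) =====
-- stated objective: alternative
-- what changed: B is declarative instead of an early-return scan: one comprehension over circular indices j (using (j+1) % n, so the wraparound pair is just another index) collects ALL bracketing positions, a priority rule picks n-1 if present else the smallest, and the fallback is min(range(n), key=list.__getitem__) instead of in-loop minimum tracking with a post-loop last-element fixup.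
import Mathlib
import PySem

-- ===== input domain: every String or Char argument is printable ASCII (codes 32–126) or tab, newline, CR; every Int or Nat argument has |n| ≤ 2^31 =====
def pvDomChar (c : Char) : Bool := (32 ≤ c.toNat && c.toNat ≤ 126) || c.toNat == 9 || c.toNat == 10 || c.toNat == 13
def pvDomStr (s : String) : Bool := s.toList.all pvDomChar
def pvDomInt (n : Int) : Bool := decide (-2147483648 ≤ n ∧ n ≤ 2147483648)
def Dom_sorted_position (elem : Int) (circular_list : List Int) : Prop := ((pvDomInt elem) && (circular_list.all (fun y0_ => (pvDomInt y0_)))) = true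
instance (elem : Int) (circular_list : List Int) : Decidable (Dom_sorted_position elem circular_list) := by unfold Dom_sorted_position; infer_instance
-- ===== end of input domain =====

-- B replaces A's early-return scan (with in-loop minimum tracking and post-loop fixups) by a
-- declarative formulation: one comprehension collects ALL circular bracketing indices, a priority
-- rule picks among them, and the fallback is min over indices by key — simpler decomposition, same cost.

-- ===== PORT A =====
-- the for-loop of A: index i, running first-minimum index m; all getD accesses are in range (i < len-1)
-- fuel counts the remaining iterations: fuel = (len - 1) - i at every call
def spLoopA (elem : Int) (l : List Int) : Nat → Nat → Nat → Int
  | 0, _i, m =>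
    -- after the loop: if circular_list[-1] < circular_list[minimum]: minimum = len - 1
    if PySem.List.pyGetD l (-1) 0 < l.getD m 0 then ((l.length : Int) - 1) else (m : Int)
  | fuel + 1, i, m =>
    let m' := if l.getD i 0 < l.getD m 0 then i else m
    if l.getD i 0 ≥ elem ∧ elem ≥ l.getD (i + 1) 0 then (i : Int)
    else spLoopA elem l fuel (i + 1) m'

def sorted_position (elem : Int) (circular_list : List Int) : Int :=
  if circular_list.length < 2 then 0
  else if PySem.List.pyGetD circular_list (-1) 0 ≥ elem ∧ elem ≥ PySem.List.pyGetD circular_list 0 0 then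
    (circular_list.length : Int) - 1
  else spLoopA elem circular_list (circular_list.length - 1) 0 0

-- ===== PORT B =====
-- hits = [j for j in range(n) if l[j] >= elem >= l[(j+1) % n]]; every access is in range (j < n)
def sorted_position_alt (elem : Int) (circular_list : List Int) : Int :=
  let n := circular_list.length
  if n < 2 then 0
  else
    let hits := (List.range n).filter
      (fun j => decide (circular_list.getD j 0 ≥ elem ∧ elem ≥ circular_list.getD ((j + 1) % n) 0))
    if hits ≠ [] then
      -- wraparound pair (index n-1) has priority; otherwise the earliest pair: hits[-1], hits[0]
      if PySem.List.pyGetD hits (-1) 0 = n - 1 then ((n - 1 : Nat) : Int)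
      else ((PySem.List.pyGetD hits 0 0 : Nat) : Int)
    else
      -- min(range(n), key=circular_list.__getitem__): first index of the minimum
      (((PySem.List.min? (List.range n) (fun j => circular_list.getD j 0)).getD 0 : Nat) : Int)

-- ===== PRECONDITION & SPEC =====
def Spec_sorted_position (elem : Int) (circular_list : List Int) (out : Int) : Prop := out = sorted_position_alt elem circular_list
instance (elem : Int) (circular_list : List Int) (out : Int) : Decidable (Spec_sorted_position elem circular_list out) := by unfold Spec_sorted_position; infer_instance

-- ===== CLAIM (what is proved, stated in full; the proofs are below) =====
def Claim_equal_sorted_position : Prop := ∀ (elem : Int) (circular_list : List Int), Dom_sorted_position elem circular_list → Spec_sorted_position elem circular_list (sorted_position elem circular_list)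

-- ===== LEMMAS AND PROOFS =====

-- proof-side helper: first index i of an adjacent pair with l[i] >= elem >= l[i+1]
def spFind (elem : Int) : List Int → Option Nat
  | a :: b :: rest => if a ≥ elem ∧ elem ≥ b then some 0 else (spFind elem (b :: rest)).map (· + 1)
  | _ => none

theorem spFind_none (elem : Int) (l : List Int) (h : l.length ≤ 1) : spFind elem l = none := by
  match l with
  | [] => rfl
  | [_] => rfl
  | _ :: _ :: _ => simp at h

-- min? over range computes on appending the next index
theorem spMin_range_succ (key : Nat → Int) (n : Nat) :
    PySem.List.min? (List.range (n + 1)) key =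
      match PySem.List.min? (List.range n) key with
      | none => some n
      | some m => if key n < key m then some n else some m := by
  unfold PySem.List.min?
  rw [List.range_succ, List.foldl_append, List.foldl_cons, List.foldl_nil]
  split
  · next heq => rw [heq]
  · next m heq => rw [heq]

-- characterisation of min(range n, key): it is any k < n with key minimal and strictly first
theorem spMin_range_eq (key : Nat → Int) : ∀ (n k : Nat), k < n →
    (∀ j, j < n → key k ≤ key j) → (∀ j, j < k → key k < key j) →
    PySem.List.min? (List.range n) key = some k := by
  intro n
  induction n with
  | zero => intro k hk; omega
  | succ n ih =>
    intro k hk hmin hfirst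
    rw [spMin_range_succ]
    rcases Nat.lt_or_ge k n with hkn | hkn
    · rw [ih k hkn (fun j hj => hmin j (by omega)) hfirst]
      have h1 := hmin n (by omega)
      have h2 : ¬ key n < key k := not_lt.mpr h1
      simp only [h2, if_false]
    · have hkeq : n = k := by omega
      subst hkeq
      rcases Nat.eq_zero_or_pos n with h0 | h0
      · subst h0; rfl
      · obtain ⟨m, hm⟩ : ∃ m, PySem.List.min? (List.range n) key = some m := by
          cases hml : PySem.List.min? (List.range n) key with
          | none =>
            have := (PySem.List.min?_eq_none_iff (List.range n) key).mp hml
            simp [List.range_eq_nil] at this; omega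
          | some m => exact ⟨m, rfl⟩
        have hmmem : m ∈ List.range n := PySem.List.min?_mem hm
        have hmlt : m < n := List.mem_range.mp hmmem
        rw [hm]
        simp only [hfirst m hmlt, if_true]

-- main loop lemma: spLoopA computes search-then-min-fallback
theorem spLoopA_eq (elem : Int) (l : List Int) (hl : 2 ≤ l.length) :
    ∀ d i m, l.length - 1 - i = d → i ≤ l.length - 1 → m < l.length → m ≤ i →
      (∀ j, j < i → l.getD m 0 ≤ l.getD j 0) →
      (∀ j, j < m → l.getD m 0 < l.getD j 0) →
      spLoopA elem l d i m =
        match spFind elem (l.drop i) with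
        | some j => ((i + j : Nat) : Int)
        | none => (((PySem.List.min? (List.range l.length) (fun j => l.getD j 0)).getD 0 : Nat) : Int) := by
  intro d
  induction d with
  | zero =>
    intro i m hd hi hm hmi hle hlt
    have hieq : i = l.length - 1 := by omega
    subst hieq
    show (if PySem.List.pyGetD l (-1) 0 < l.getD m 0 then ((l.length : Int) - 1) else (m : Int)) = _
    have hfn : spFind elem (l.drop (l.length - 1)) = none :=
      spFind_none elem _ (by rw [List.length_drop]; omega)
    rw [hfn]
    have hmatch : (match (none : Option Nat) with
        | some j => ((l.length - 1 + j : Nat) : Int)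
        | none => (((PySem.List.min? (List.range l.length) (fun j => l.getD j 0)).getD 0 : Nat) : Int)) =
        (((PySem.List.min? (List.range l.length) (fun j => l.getD j 0)).getD 0 : Nat) : Int) := rfl
    rw [hmatch]
    have hne : l ≠ [] := by intro h; subst h; simp at hl
    have hlast : l.length - 1 < l.length := by omega
    rw [PySem.List.pyGetD_neg_one l 0 hne, List.getLast_eq_getElem]
    have hgl : l[l.length - 1] = l.getD (l.length - 1) 0 := (List.getD_eq_getElem l 0 hlast).symm
    rw [hgl]
    by_cases hc : l.getD (l.length - 1) 0 < l.getD m 0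
    · rw [if_pos hc, spMin_range_eq (fun j => l.getD j 0) l.length (l.length - 1) hlast
        (by
          intro j hj
          rcases Nat.lt_or_ge j (l.length - 1) with h | h
          · exact le_of_lt (hc.trans_le (hle j h))
          · have : j = l.length - 1 := by omega
            subst this; exact le_refl _)
        (fun j hj => hc.trans_le (hle j hj))]
      simp only [Option.getD_some]
      omega
    · rw [if_neg hc, spMin_range_eq (fun j => l.getD j 0) l.length m hm
        (by
          intro j hj
          rcases Nat.lt_or_ge j (l.length - 1) with h | h
          · exact hle j h
          · have : j = l.length - 1 := by omega
            subst this; exact not_lt.mp hc)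
        hlt]
      simp
  | succ d ih =>
    intro i m hd hi hm hmi hle hlt
    have hilt : i < l.length - 1 := by omega
    have hi1 : i < l.length := by omega
    have hi2 : i + 1 < l.length := by omega
    show (let m' := if l.getD i 0 < l.getD m 0 then i else m
      if l.getD i 0 ≥ elem ∧ elem ≥ l.getD (i + 1) 0 then (i : Int)
      else spLoopA elem l d (i + 1) m') = _
    simp only []
    have hdrop : l.drop i = l.getD i 0 :: l.getD (i + 1) 0 :: l.drop (i + 2) := by
      rw [List.drop_eq_getElem_cons hi1, List.drop_eq_getElem_cons hi2,
        List.getD_eq_getElem l 0 hi1, List.getD_eq_getElem l 0 hi2]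
    rw [hdrop]
    by_cases hdesc : l.getD i 0 ≥ elem ∧ elem ≥ l.getD (i + 1) 0
    · rw [if_pos hdesc]
      simp only [spFind, if_pos hdesc]
      simp
    · rw [if_neg hdesc]
      simp only [spFind, if_neg hdesc]
      have hrec := ih (i + 1) (if l.getD i 0 < l.getD m 0 then i else m) (by omega) (by omega)
        (by split_ifs <;> omega) (by split_ifs <;> omega)
        (by
          intro j hj
          by_cases hu : l.getD i 0 < l.getD m 0
          · rw [if_pos hu]
            rcases Nat.lt_or_ge j i with h | h
            · exact le_of_lt (lt_of_lt_of_le hu (hle j h))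
            · have : j = i := by omega
              subst this; exact le_refl _
          · rw [if_neg hu]
            rcases Nat.lt_or_ge j i with h | h
            · exact hle j h
            · have : j = i := by omega
              subst this; omega
          )
        (by
          intro j hj
          by_cases hu : l.getD i 0 < l.getD m 0
          · rw [if_pos hu] at hj ⊢
            exact lt_of_lt_of_le hu (hle j hj)
          · rw [if_neg hu] at hj ⊢
            exact hlt j hj
          )
      rw [hrec]
      have hdrop1 : l.drop (i + 1) = l.getD (i + 1) 0 :: l.drop (i + 2) := by
        rw [List.drop_eq_getElem_cons hi2, List.getD_eq_getElem l 0 hi2]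
      rw [hdrop1]
      cases spFind elem (l.getD (i + 1) 0 :: l.drop (i + 2)) with
      | none => rfl
      | some j =>
        show ((i + 1 + j : Nat) : Int) = ((i + (j + 1) : Nat) : Int)
        congr 1
        omega

-- spFind is the head of the filtered index list (pair condition, no mod)
theorem spFind_eq_filter_head (elem : Int) : ∀ (l : List Int),
    spFind elem l = ((List.range (l.length - 1)).filter
      (fun j => decide (l.getD j 0 ≥ elem ∧ elem ≥ l.getD (j + 1) 0))).head? := by
  intro l
  match l with
  | [] => rfl
  | [_] => rfl
  | a :: b :: rest =>
    have IH := spFind_eq_filter_head elem (b :: rest)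
    show spFind elem (a :: b :: rest) = _
    rw [spFind]
    have hlen : (a :: b :: rest).length - 1 = rest.length + 1 := by simp
    rw [hlen, List.range_succ_eq_map, List.filter_cons]
    by_cases h0 : a ≥ elem ∧ elem ≥ b
    · rw [if_pos h0]
      have : (decide ((a :: b :: rest).getD 0 0 ≥ elem ∧ elem ≥ (a :: b :: rest).getD (0 + 1) 0)) = true := by
        simp [h0.1, h0.2]
      rw [this]
      simp
    · rw [if_neg h0]
      have : (decide ((a :: b :: rest).getD 0 0 ≥ elem ∧ elem ≥ (a :: b :: rest).getD (0 + 1) 0)) = false := by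
        simpa using h0
      rw [this]
      simp only [Bool.false_eq_true, if_false]
      rw [List.filter_map, List.head?_map, IH]
      have hlen2 : (b :: rest).length - 1 = rest.length := by simp
      rw [hlen2]
      congr 1

-- ===== VERDICT (by name: the statement is the Claim_ definition above) =====
theorem sorted_position_spec : Claim_equal_sorted_position := by
  intro elem l _
  unfold Spec_sorted_position sorted_position sorted_position_alt
  by_cases h2 : l.length < 2
  · simp only [if_pos h2]
  · simp only [if_neg h2]
    have hn2 : 2 ≤ l.length := by omega
    have hne : l ≠ [] := by intro h; subst h; simp at hn2
    have hlast : l.length - 1 < l.length := by omega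
    -- translate A's wrap condition into B's predicate at index n-1
    have hwrapA : (PySem.List.pyGetD l (-1) 0 ≥ elem ∧ elem ≥ PySem.List.pyGetD l 0 0) ↔
        (l.getD (l.length - 1) 0 ≥ elem ∧ elem ≥ l.getD ((l.length - 1 + 1) % l.length) 0) := by
      rw [PySem.List.pyGetD_neg_one l 0 hne, List.getLast_eq_getElem,
        List.getD_eq_getElem l 0 hlast]
      have hmod : (l.length - 1 + 1) % l.length = 0 := by
        have : l.length - 1 + 1 = l.length := by omega
        rw [this, Nat.mod_self]
      rw [hmod]
      have h0 : PySem.List.pyGetD l 0 0 = l.getD 0 0 := by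
        cases l with
        | nil => simp at hn2
        | cons a t => simp [PySem.List.pyGetD, PySem.List.pyGet?, PySem.List.pyIdx?]
      rw [h0]
    set P : Nat → Bool :=
      fun j => decide (l.getD j 0 ≥ elem ∧ elem ≥ l.getD ((j + 1) % l.length) 0) with hP
    have hsplit : List.range l.length = List.range (l.length - 1) ++ [l.length - 1] := by
      have : l.length = (l.length - 1) + 1 := by omega
      rw [this, List.range_succ]
      congr 1
    by_cases hw : PySem.List.pyGetD l (-1) 0 ≥ elem ∧ elem ≥ PySem.List.pyGetD l 0 0
    · -- wraparound: A returns n-1; B's hits end with n-1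
      rw [if_pos hw]
      have hPn : P (l.length - 1) = true := by
        rw [hP]; simp only [decide_eq_true_eq]; exact hwrapA.mp hw
      have hfs : List.filter P [l.length - 1] = [l.length - 1] := by simp [hPn]
      rw [hsplit, List.filter_append, hfs]
      have hne2 : (List.range (l.length - 1)).filter P ++ [l.length - 1] ≠ [] := by simp
      rw [if_pos hne2]
      have hlastEq : PySem.List.pyGetD ((List.range (l.length - 1)).filter P ++ [l.length - 1]) (-1) 0
          = l.length - 1 := by
        rw [PySem.List.pyGetD_neg_one _ 0 hne2, List.getLast_append]
        simp
      rw [if_pos hlastEq]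
      omega
    · -- no wraparound: A scans; B's hits live inside range (n-1)
      rw [if_neg hw]
      have hPn : P (l.length - 1) = false := by
        rw [hP]; simp only [decide_eq_false_iff_not]
        intro hc; exact hw (hwrapA.mpr hc)
      have hhits : (List.range l.length).filter P = (List.range (l.length - 1)).filter P := by
        rw [hsplit, List.filter_append]
        simp [hPn]
      -- inside range (n-1) the mod in P is the identity
      have hhits2 : (List.range (l.length - 1)).filter P =
          (List.range (l.length - 1)).filter
            (fun j => decide (l.getD j 0 ≥ elem ∧ elem ≥ l.getD (j + 1) 0)) := by
        apply List.filter_congr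
        intro x hx
        have hx' : x < l.length - 1 := List.mem_range.mp hx
        show decide (l.getD x 0 ≥ elem ∧ elem ≥ l.getD ((x + 1) % l.length) 0) = _
        have hmx : (x + 1) % l.length = x + 1 := Nat.mod_eq_of_lt (by omega)
        rw [hmx]
      have hA := spLoopA_eq elem l hn2 (l.length - 1) 0 0 (by omega) (by omega) (by omega)
        (le_refl 0) (fun j hj => absurd hj (by omega)) (fun j hj => absurd hj (by omega))
      rw [hA]
      simp only [List.drop_zero]
      rw [spFind_eq_filter_head elem l, hhits, hhits2]
      cases hcase : ((List.range (l.length - 1)).filter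
          (fun j => decide (l.getD j 0 ≥ elem ∧ elem ≥ l.getD (j + 1) 0))) with
      | nil => simp
      | cons h t =>
        have hmem : h ∈ List.range (l.length - 1) := by
          have : h ∈ (List.range (l.length - 1)).filter
              (fun j => decide (l.getD j 0 ≥ elem ∧ elem ≥ l.getD (j + 1) 0)) := by
            rw [hcase]; exact List.mem_cons_self
          exact List.mem_of_mem_filter this
        have hh : h < l.length - 1 := List.mem_range.mp hmem
        have hcne : h :: t ≠ ([] : List Nat) := by simp
        rw [if_pos hcne]
        have hlastlt : (h :: t).getLast hcne < l.length - 1 := by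
          have h1 : (h :: t).getLast hcne ∈ (List.range (l.length - 1)).filter
              (fun j => decide (l.getD j 0 ≥ elem ∧ elem ≥ l.getD (j + 1) 0)) := by
            rw [hcase]; exact List.getLast_mem hcne
          exact List.mem_range.mp (List.mem_of_mem_filter h1)
        have hlastne : PySem.List.pyGetD (h :: t) (-1) 0 ≠ l.length - 1 := by
          rw [PySem.List.pyGetD_neg_one _ 0 hcne]
          omega
        rw [if_neg hlastne]
        have hhead : PySem.List.pyGetD (h :: t) 0 0 = h := by
          simp [PySem.List.pyGetD, PySem.List.pyIdx?, PySem.List.pyGet?]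
        rw [hhead]
        simp
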